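-- pv_equiv track=rewrite | github.com/KumarAmbuj/gfg_string_reverse_and_rotation | 1.PERFECT REVERSIBLE.py | isReversible
-- ===== SOURCE A (Python) =====
-- def isReversible(s):
--     for i in range(len(s)-1):
--         res=s[i]
--         for j in range(i+1,len(s)):
--             res=res+s[j]
--             rev=res[::-1]
--             if rev not in s:
--                 return False
--     return True
-- ===== SOURCE B (Python) =====
-- def isReversible(s):
--     return s == s[::-1]
-- ===== Notes on version B (the rewrite author's own statement) =====
-- stated objective: faster
-- what changed: Replaced the O(n^4) scan that checks every substring's reverse for membership by the closed-form palindrome test s == s[::-1], which is provably equivalent.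
import Mathlib
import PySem

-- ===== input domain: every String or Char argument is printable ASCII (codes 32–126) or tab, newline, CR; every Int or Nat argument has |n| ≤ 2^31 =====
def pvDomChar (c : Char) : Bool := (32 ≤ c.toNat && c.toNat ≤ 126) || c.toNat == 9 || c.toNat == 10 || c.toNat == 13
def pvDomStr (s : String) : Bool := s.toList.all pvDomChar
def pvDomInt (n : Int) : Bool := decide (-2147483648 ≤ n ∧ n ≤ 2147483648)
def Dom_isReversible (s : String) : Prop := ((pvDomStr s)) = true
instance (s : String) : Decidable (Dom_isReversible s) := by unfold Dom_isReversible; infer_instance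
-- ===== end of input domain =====

-- B replaces A's nested scan (every prefix-extension's reverse tested for substring membership) by the
-- closed-form palindrome test 's == s[::-1]', proved to return the same Bool (objective: faster).

-- ===== PORT A =====
-- inner loop: 'for j in range(i+1, len(s)): res = res + s[j]; rev = res[::-1]; if rev not in s: return False'
def isReversibleInner (l : List Char) : List Char → List Int → Bool
  | _res, [] => true
  | res, j :: js =>
      let res' := res ++ [PySem.List.pyGetD l j ' ']          -- res = res + s[j] (j always in range)
      let rev := res'.reverse                                  -- res[::-1] (PySem.List.slice?_none_none_neg_one)
      if PySem.Chars.isIn rev l then isReversibleInner l res' js else false   -- 'if rev not in s: return False'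

-- outer loop: 'for i in range(len(s)-1): res = s[i]; <inner loop>'; falls through to 'return True'
def isReversibleOuter (l : List Char) : List Int → Bool
  | [] => true
  | i :: is =>
      let res := [PySem.List.pyGetD l i ' ']                   -- res = s[i] (i always in range)
      if isReversibleInner l res (PySem.List.pyRange (i + 1) (l.length : Int) 1)
      then isReversibleOuter l is else false

def isReversible (s : String) : Bool :=
  isReversibleOuter s.toList (PySem.List.pyRange 0 (PySem.Str.len s - 1) 1)

-- ===== PORT B =====
-- B: 'return s == s[::-1]'  (s[::-1] is reverse: PySem.Str.slice?_none_none_neg_one)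
def isReversible_alt (s : String) : Bool :=
  s.toList == s.toList.reverse

-- ===== PRECONDITION & SPEC =====
def Spec_isReversible (s : String) (out : Bool) : Prop := out = isReversible_alt s
instance (s : String) (out : Bool) : Decidable (Spec_isReversible s out) := by unfold Spec_isReversible; infer_instance

-- ===== CLAIM (what is proved, stated in full; the proofs are below) =====
def Claim_equal_isReversible : Prop := ∀ (s : String), Dom_isReversible s → Spec_isReversible s (isReversible s)

-- ===== LEMMAS AND PROOFS =====

-- the segment l[i : i+m] is an infix of l
lemma seg_infix (l : List Char) (i m : Nat) : (l.drop i).take m <:+: l :=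
  ⟨l.take i, (l.drop i).drop m, by simp⟩

-- extending the segment by the next character
lemma seg_snoc (l : List Char) (i k : Nat) (h : i + k < l.length) :
    (l.drop i).take k ++ [l[i + k]] = (l.drop i).take (k + 1) := by
  have hk : k < (l.drop i).length := by simp; omega
  rw [List.take_add_one]
  simp [List.getElem?_eq_getElem hk]

lemma take_one_drop (l : List Char) (j : Nat) (h : j < l.length) :
    (l.drop j).take 1 = [l[j]] := by
  have := seg_snoc l j 0 (by omega)
  simpa using this.symm

-- on a palindrome every check of the inner loop passes
lemma inner_palin (l : List Char) (hp : l.reverse = l) :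
    ∀ (m i k : Nat), 0 < k → i + k + m = l.length →
      isReversibleInner l ((l.drop i).take k)
        (PySem.List.pyRange ((i + k : Nat) : Int) (l.length : Int) 1) = true := by
  intro m
  induction m with
  | zero =>
      intro i k _ hik
      rw [PySem.List.pyRange_one_eq_nil (by omega)]
      rfl
  | succ m ih =>
      intro i k hk hik
      have hlt : i + k < l.length := by omega
      rw [PySem.List.pyRange_one_cons (by exact_mod_cast hlt)]
      unfold isReversibleInner
      simp only [PySem.List.pyGetD_natCast, List.getD_eq_getElem _ _ hlt, seg_snoc l i k hlt]
      have hin : PySem.Chars.isIn ((List.take (k+1) (List.drop i l)).reverse) l = true := by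
        rw [PySem.Chars.isIn_iff_infix]
        have h2 := List.reverse_infix.mpr (seg_infix l i (k+1))
        rwa [hp] at h2
      rw [if_pos hin]
      have : ((i + k : Nat) : Int) + 1 = ((i + (k+1) : Nat) : Int) := by push_cast; ring
      rw [this]
      exact ih i (k+1) (by omega) (by omega)

-- if the whole inner loop returns True, its final (full-segment) check passed
lemma inner_last (l : List Char) :
    ∀ (js : List Int) (res : List Char), js ≠ [] →
      isReversibleInner l res js = true →
      PySem.Chars.isIn (res ++ js.map (fun j => PySem.List.pyGetD l j ' ')).reverse l = true := by
  intro js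
  induction js with
  | nil => intro _ h; exact absurd rfl h
  | cons j js ih =>
      intro res _ hrun
      unfold isReversibleInner at hrun
      by_cases hin : PySem.Chars.isIn ((res ++ [PySem.List.pyGetD l j ' ']).reverse) l = true
      · rw [if_pos hin] at hrun
        cases js with
        | nil => simpa using hin
        | cons j' js' =>
            have := ih (res ++ [PySem.List.pyGetD l j ' ']) (by simp) hrun
            simpa using this
      · rw [if_neg hin] at hrun
        exact absurd hrun (by simp)

-- on a palindrome the outer loop returns True
lemma outer_palin (l : List Char) (hp : l.reverse = l) :
    ∀ is : List Int, (∀ i ∈ is, 0 ≤ i ∧ i < (l.length : Int)) →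
      isReversibleOuter l is = true := by
  intro is
  induction is with
  | nil => intro _; rfl
  | cons i is ih =>
      intro hmem
      obtain ⟨h0, hlt⟩ := hmem i (by simp)
      obtain ⟨j, rfl⟩ : ∃ j : Nat, i = (j : Int) := ⟨i.toNat, (Int.toNat_of_nonneg h0).symm⟩
      have hj : j < l.length := by exact_mod_cast hlt
      unfold isReversibleOuter
      have hres : [PySem.List.pyGetD l (j : Int) ' '] = (l.drop j).take 1 := by
        rw [take_one_drop l j hj]
        simp [List.getElem?_eq_getElem hj]
      have hcast : (j : Int) + 1 = ((j + 1 : Nat) : Int) := by push_cast; ring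
      show (if isReversibleInner l [PySem.List.pyGetD l (j : Int) ' ']
              (PySem.List.pyRange ((j : Int) + 1) (l.length : Int) 1)
            then isReversibleOuter l is else false) = true
      rw [hres, hcast, inner_palin l hp (l.length - (j+1)) j 1 (by omega) (by omega)]
      exact ih (fun x hx => hmem x (by simp [hx]))

-- A returns True exactly on palindromes
lemma isReversible_iff (s : String) :
    isReversible s = true ↔ s.toList.reverse = s.toList := by
  unfold isReversible
  rw [PySem.Str.len_eq]
  generalize s.toList = l
  constructor
  · intro h
    match l, h with
    | [], _ => rfl
    | [a], _ => rfl
    | a :: b :: t, h =>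
      set l := a :: b :: t with hl
      have hn : 2 ≤ l.length := by simp [hl]
      have h1 : (0:Int) < (l.length : Int) - 1 := by
        have : (2:Int) ≤ (l.length : Int) := by exact_mod_cast hn
        omega
      rw [PySem.List.pyRange_one_cons (by omega)] at h
      unfold isReversibleOuter at h
      by_cases hin : isReversibleInner l [PySem.List.pyGetD l 0 ' ']
          (PySem.List.pyRange (0 + 1) (l.length : Int) 1) = true
      · have hne : PySem.List.pyRange ((0:Int) + 1) (l.length : Int) 1 ≠ [] := by
          rw [show ((0:Int)+1) = 1 by norm_num, PySem.List.pyRange_one_cons (by omega)]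
          simp
        have hlast := inner_last l _ _ hne hin
        have hmap : (PySem.List.pyRange ((0:Int) + 1) (l.length : Int) 1).map
            (fun j => PySem.List.pyGetD l j ' ') = l.drop 1 := by
          rw [show ((0:Int)+1) = ((1:Nat):Int) by norm_num]
          simpa using PySem.List.map_pyGetD_pyRange' l ' ' (by norm_num : (0:Int) ≤ ((1:Nat):Int))
        rw [hmap] at hlast
        have : ([PySem.List.pyGetD l 0 ' '] ++ l.drop 1) = l := by
          simp [hl, PySem.List.pyGetD_zero_cons]
        rw [this, PySem.Chars.isIn_iff_infix] at hlast
        exact hlast.sublist.eq_of_length (by simp)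
      · rw [if_neg hin] at h
        exact absurd h (by simp)
  · intro hp
    exact outer_palin l hp _ (fun i hi => by
      have := PySem.List.mem_pyRange_one.mp hi
      exact ⟨this.1, by omega⟩)

-- ===== VERDICT (by name: the statement is the Claim_ definition above) =====
theorem isReversible_spec : Claim_equal_isReversible := by
  intro s _
  unfold Spec_isReversible isReversible_alt
  rw [Bool.eq_iff_iff, isReversible_iff, beq_iff_eq, eq_comm]
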